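-- pv_equiv track=rewrite | github.com/fitz-s/openclaw-finance | docs/openclaw-runtime/parent-runtime/services/market-ingest/normalizer/source_promotion.py | registry_match
-- ===== SOURCE A (Python) =====
-- from typing import Any
--
-- def registry_match(source_name: str, registry: list[dict[str, Any]]) -> dict[str, Any] | None:
--     lowered = source_name.lower()
--     wildcard = None
--     for source in registry:
--         patterns = source.get("domain_patterns", [])
--         if "*" in patterns:
--             wildcard = source
--             continue
--         for pattern in patterns:
--             if str(pattern).lower() in lowered:
--                 return source
--     return wildcard
-- ===== SOURCE B (Python) =====
-- def registry_match(source_name, registry):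
--     lowered = source_name.lower()
--     # pass 1: first non-wildcard source with a pattern occurring in the name
--     for source in registry:
--         patterns = source.get("domain_patterns", [])
--         if "*" not in patterns and any(str(p).lower() in lowered for p in patterns):
--             return source
--     # pass 2: otherwise the wildcard source seen latest in the registry
--     for source in reversed(registry):
--         if "*" in source.get("domain_patterns", []):
--             return source
--     return None
-- ===== Notes on version B (the rewrite author's own statement) =====
-- stated objective: simpler
-- what changed: Replaces A's single stateful scan (mutable wildcard accumulator with early return) by two stateless passes: a forward scan for the first substring match and, failing that, a reverse scan for the last wildcard entry.
import Mathlib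
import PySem

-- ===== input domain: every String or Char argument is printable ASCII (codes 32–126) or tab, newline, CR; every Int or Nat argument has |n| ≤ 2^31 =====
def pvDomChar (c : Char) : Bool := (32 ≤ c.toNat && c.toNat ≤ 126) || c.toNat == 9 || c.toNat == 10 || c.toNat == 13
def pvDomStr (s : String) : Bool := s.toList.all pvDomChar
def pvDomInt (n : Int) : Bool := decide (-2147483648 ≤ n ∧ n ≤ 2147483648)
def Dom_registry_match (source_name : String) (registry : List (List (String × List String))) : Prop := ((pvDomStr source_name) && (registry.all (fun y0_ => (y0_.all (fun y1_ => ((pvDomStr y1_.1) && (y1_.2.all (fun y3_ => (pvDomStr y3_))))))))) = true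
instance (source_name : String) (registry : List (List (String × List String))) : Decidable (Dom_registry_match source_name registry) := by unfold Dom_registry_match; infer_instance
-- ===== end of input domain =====

-- ===== PORT A =====
-- B replaces A's single stateful scan with two stateless passes; return values agree everywhere (objective: simpler).
def pvInnerA (lowered : String) (source : List (String × List String)) :
    List String → Option (List (String × List String))
  | [] => none
  | p :: ps =>
    if PySem.Str.isIn (PySem.Str.lower p) lowered then some source
    else pvInnerA lowered source ps

def pvGoA (lowered : String) :
    List (List (String × List String)) → Option (List (String × List String)) →
      Option (List (String × List String))
  | [], wildcard => wildcard
  | source :: rest, wildcard =>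
    let patterns := (PySem.Dict.mk source).getD "domain_patterns" []
    if patterns.contains "*" then pvGoA lowered rest (some source)
    else
      match pvInnerA lowered source patterns with
      | some r => some r
      | none => pvGoA lowered rest wildcard

def registry_match (source_name : String) (registry : List (List (String × List String))) : Option (List (String × List String)) :=
  pvGoA (PySem.Str.lower source_name) registry none

-- ===== PORT B =====
-- pass 1: first non-wildcard source with a matching pattern
def pvFindMatch (lowered : String) :
    List (List (String × List String)) → Option (List (String × List String))
  | [] => none
  | source :: rest =>
    let patterns := (PySem.Dict.mk source).getD "domain_patterns" []
    if !patterns.contains "*" && patterns.any (fun p => PySem.Str.isIn (PySem.Str.lower p) lowered)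
    then some source
    else pvFindMatch lowered rest

-- pass 2: first wildcard source of the reversed registry
def pvFindWild :
    List (List (String × List String)) → Option (List (String × List String))
  | [] => none
  | source :: rest =>
    if ((PySem.Dict.mk source).getD "domain_patterns" []).contains "*" then some source
    else pvFindWild rest

def registry_match_alt (source_name : String) (registry : List (List (String × List String))) : Option (List (String × List String)) :=
  let lowered := PySem.Str.lower source_name
  match pvFindMatch lowered registry with
  | some s => some s
  | none =>
    match pvFindWild registry.reverse with
    | some s => some s
    | none => none

-- ===== PRECONDITION & SPEC =====
def Spec_registry_match (source_name : String) (registry : List (List (String × List String))) (out : Option (List (String × List String))) : Prop := out = registry_match_alt source_name registry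
instance (source_name : String) (registry : List (List (String × List String))) (out : Option (List (String × List String))) : Decidable (Spec_registry_match source_name registry out) := by unfold Spec_registry_match; infer_instance

-- ===== CLAIM (what is proved, stated in full; the proofs are below) =====
def Claim_equal_registry_match : Prop := ∀ (source_name : String) (registry : List (List (String × List String))), Dom_registry_match source_name registry → Spec_registry_match source_name registry (registry_match source_name registry)

-- ===== LEMMAS AND PROOFS =====

-- A's inner loop over the patterns is B's List.any
theorem pvInnerA_eq (lowered : String) (source : List (String × List String)) (ps : List String) :
    pvInnerA lowered source ps =
      if ps.any (fun p => PySem.Str.isIn (PySem.Str.lower p) lowered) then some source else none := by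
  induction ps with
  | nil => simp [pvInnerA]
  | cons p ps ih =>
    simp only [pvInnerA, List.any_cons, ih]
    by_cases h : PySem.Chars.isIn (PySem.Chars.lower p.toList) lowered.toList = true <;> simp [h]

-- scanning the reverse of xs ++ [a] looks at a only when xs has no wildcard
theorem pvFindWild_append (xs : List (List (String × List String))) (a : List (String × List String)) :
    pvFindWild (xs ++ [a]) =
      match pvFindWild xs with
      | some s => some s
      | none =>
        if ((PySem.Dict.mk a).getD "domain_patterns" []).contains "*" then some a else none := by
  induction xs with
  | nil => simp [pvFindWild]
  | cons x xs ih =>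
    simp only [List.cons_append, pvFindWild, ih]
    by_cases h : "*" ∈ (PySem.Dict.mk x).getD "domain_patterns" [] <;> simp [h]

-- A's stateful scan equals pass 1 then pass 2 (falling back to the accumulator)
theorem pvGoA_eq (lowered : String) (l : List (List (String × List String)))
    (w : Option (List (String × List String))) :
    pvGoA lowered l w =
      match pvFindMatch lowered l with
      | some s => some s
      | none =>
        match pvFindWild l.reverse with
        | some s => some s
        | none => w := by
  induction l generalizing w with
  | nil => simp [pvGoA, pvFindMatch, pvFindWild]
  | cons source rest ih =>
    simp only [pvGoA, pvFindMatch, List.reverse_cons, pvFindWild_append, pvInnerA_eq, ih]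
    by_cases hw : "*" ∈ (PySem.Dict.mk source).getD "domain_patterns" []
    · cases pvFindMatch lowered rest <;> cases pvFindWild rest.reverse <;> simp [hw]
    · by_cases hm : ∃ x ∈ (PySem.Dict.mk source).getD "domain_patterns" [],
          PySem.Chars.isIn (PySem.Chars.lower x.toList) lowered.toList = true
      · simp [hw, hm]
      · cases pvFindMatch lowered rest <;> cases pvFindWild rest.reverse <;> simp [hw, hm]

-- ===== VERDICT (by name: the statement is the Claim_ definition above) =====
theorem registry_match_spec : Claim_equal_registry_match := by
  intro source_name registry _
  unfold Spec_registry_match registry_match registry_match_alt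
  rw [pvGoA_eq]
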